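-- pv_equiv track=rewrite | github.com/AmadoMiguel/PY4E-exercises | Practice Exercises/dict_test.py | primerDuplic
-- ===== SOURCE A (Python) =====
-- def primerDuplic(numList):
--     # Create a copy of the original list and invert it
--     invList = numList
--     invList.reverse()
--     # Prepare the histogram
--     dic = {}
--     primRep = None
--     for num in numList:
--         # numList histogram
--         dic[num] = dic.get(num,0) + 1
--     # Check for repeated numbers
--     for num,rep in dic.items():
--         # If a number appears more than once in numList
--         if rep > 1:
--             # Ask for the index in the inverted list, so it actually finds the
--             # first repeated number index, not the last.
--             ind = invList.index(num)
--             # Determine the index of the first repeated number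
--             if primRep == None or primRep<ind:
--                 primRep = ind
--     if primRep == None:
--         return None
--     else:
--         # Returns the index of the first repeated number
--         return primRep
-- ===== SOURCE B (Python) =====
-- def primerDuplic(numList):
--     # Same in-place reversal side effect as the original.
--     numList.reverse()
--     # Online repeat detection: remember each value's first index; whenever a
--     # value shows up again, its stored first index is a candidate — keep the max.
--     seen = {}
--     best = None
--     for i, num in enumerate(numList):
--         if num in seen:
--             if best is None or seen[num] > best:
--                 best = seen[num]
--         else:
--             seen[num] = i
--     return best
-- ===== Notes on version B (the rewrite author's own statement) =====
-- stated objective: faster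
-- what changed: A builds a histogram and then runs a linear list.index scan for every duplicated value; B makes a single online pass over the reversed list with a seen-dict, and whenever an element repeats it updates a running maximum with that value's stored first index -- no histogram, no candidate list, no inner scans.
import Mathlib
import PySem

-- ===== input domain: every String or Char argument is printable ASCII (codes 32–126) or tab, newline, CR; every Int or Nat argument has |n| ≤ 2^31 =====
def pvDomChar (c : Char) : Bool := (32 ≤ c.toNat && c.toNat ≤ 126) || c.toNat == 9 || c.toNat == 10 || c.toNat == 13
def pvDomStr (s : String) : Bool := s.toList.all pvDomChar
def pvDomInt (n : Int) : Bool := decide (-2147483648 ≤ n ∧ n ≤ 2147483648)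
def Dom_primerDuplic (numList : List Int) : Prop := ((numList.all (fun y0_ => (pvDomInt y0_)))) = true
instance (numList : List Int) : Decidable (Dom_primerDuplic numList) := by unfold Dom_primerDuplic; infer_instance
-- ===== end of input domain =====

-- B replaces A's histogram + per-duplicate list.index scans by a single online pass with a
-- seen-dict and a running maximum updated whenever an element repeats (objective: faster).
-- Both Pythons reverse numList in place; the equivalence proved here is about the RETURN
-- value (B performs the same mutation).

-- ===== PORT A =====
def primerDuplic (numList : List Int) : Option Int :=
  let invList := numList.reverse
  let dic := invList.foldl (fun d num => d.insert num (d.getD num 0 + 1)) (PySem.Dict.empty : PySem.Dict Int Int)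
  let primRep : Option Int := dic.items.foldl
    (fun (primRep : Option Int) (p : Int × Int) =>
      if p.2 > 1 then
        match PySem.List.index? invList p.1 with
        | some ind =>
          -- 'if primRep == None or primRep < ind'
          (match primRep with
           | none => some (ind : Int)
           | some q => if q < (ind : Int) then some (ind : Int) else some q)
        | none => primRep   -- unreachable: every key of dic occurs in invList
      else primRep)
    none
  primRep

-- ===== PORT B =====
def primerDuplic_alt (numList : List Int) : Option Int :=
  let inv := numList.reverse
  let st := (PySem.List.enumerate inv 0).foldl
    (fun (st : PySem.Dict Int Int × Option Int) p =>
      if st.1.contains p.2 then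
        (st.1,
         -- 'if best is None or seen[num] > best: best = seen[num]'
         match st.2 with
         | none => some (st.1.getD p.2 0)
         | some b => if b < st.1.getD p.2 0 then some (st.1.getD p.2 0) else some b)
      else (st.1.insert p.2 p.1, st.2))
    ((PySem.Dict.empty : PySem.Dict Int Int), (none : Option Int))
  st.2

-- ===== PRECONDITION & SPEC =====
def Spec_primerDuplic (numList : List Int) (out : Option Int) : Prop := out = primerDuplic_alt numList
instance (numList : List Int) (out : Option Int) : Decidable (Spec_primerDuplic numList out) := by unfold Spec_primerDuplic; infer_instance

-- ===== CLAIM (what is proved, stated in full; the proofs are below) =====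
def Claim_equal_primerDuplic : Prop := ∀ (numList : List Int), Dom_primerDuplic numList → Spec_primerDuplic numList (primerDuplic numList)

-- ===== LEMMAS AND PROOFS =====

def pvIdx (xs : List Int) (k : Int) : Int := (((PySem.List.index? xs k).getD 0 : Nat) : Int)

def pvStep (a : Option Int) (j : Int) : Option Int :=
  match a with | none => some j | some q => if q < j then some j else some q

def pvCanon (inv : List Int) : Option Int :=
  ((PySem.Set.ofList inv).filter (fun k => decide (1 < (List.count k inv : Int)))).foldl
    (fun a k => pvStep a (pvIdx inv k)) none

-- the values B's loop feeds into its running max, in order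
def pvContrib : List Int → Int → PySem.Dict Int Int → List Int
  | [], _, _ => []
  | x :: t, n, d => if d.contains x then d.getD x 0 :: pvContrib t (n + 1) d
                    else pvContrib t (n + 1) (d.insert x n)

theorem pv_foldl_maxcore_some (t : List Int) : ∀ (p : Int),
    t.foldl pvStep (some p) = some (t.foldl max p) := by
  induction t with
  | nil => intro p; rfl
  | cons x s ih =>
    intro p
    simp only [List.foldl_cons]
    have hmx : pvStep (some p) x = some (max p x) := by
      rcases lt_trichotomy p x with h|h|h
      · simp [pvStep, h, max_eq_right h.le]
      · subst h; simp [pvStep]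
      · simp [pvStep, not_lt.mpr h.le, max_eq_left h.le]
    rw [hmx]
    exact ih _

theorem pv_foldl_pvStep_eq_max? (xs : List Int) :
    xs.foldl pvStep none = xs.max? := by
  cases xs with
  | nil => rfl
  | cons x t =>
    simp only [List.foldl_cons]
    rw [show pvStep none x = some x from rfl, pv_foldl_maxcore_some, List.max?_cons']

-- max? only depends on the set of elements
theorem pv_max?_ext (l1 l2 : List Int) (h : ∀ a, a ∈ l1 ↔ a ∈ l2) :
    l1.max? = l2.max? := by
  cases h1 : l1.max? with
  | none =>
    rw [List.max?_eq_none_iff] at h1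
    subst h1
    symm
    rw [List.max?_eq_none_iff]
    cases l2 with
    | nil => rfl
    | cons x t => exact absurd ((h x).mpr (List.mem_cons_self)) (List.not_mem_nil)
  | some m =>
    rw [List.max?_eq_some_iff] at h1
    symm
    rw [List.max?_eq_some_iff]
    exact ⟨(h m).mp h1.1, fun b hb => h1.2 b ((h b).mpr hb)⟩

-- B's loop result is the running max over pvContrib
theorem pv_loopB (l : List Int) : ∀ (n : Int) (d : PySem.Dict Int Int) (b : Option Int),
    ((PySem.List.enumerate l n).foldl
      (fun (st : PySem.Dict Int Int × Option Int) p =>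
        if st.1.contains p.2 then
          (st.1,
           match st.2 with
           | none => some (st.1.getD p.2 0)
           | some q => if q < st.1.getD p.2 0 then some (st.1.getD p.2 0) else some q)
        else (st.1.insert p.2 p.1, st.2)) (d, b)).2
      = (pvContrib l n d).foldl pvStep b := by
  induction l with
  | nil => intro n d b; simp [PySem.List.enumerate_nil, pvContrib]
  | cons x t ih =>
    intro n d b
    rw [PySem.List.enumerate_cons]
    simp only [List.foldl_cons, pvContrib]
    by_cases hc : d.contains x
    · simp only [hc, if_true]
      rw [ih, List.foldl_cons]
      congr 1
    · simp only [hc, if_false, Bool.false_eq_true]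
      rw [ih]

-- membership in pvContrib when d is the first-index dict of the prefix p
theorem pv_contrib_mem (l : List Int) : ∀ (p : List Int) (d : PySem.Dict Int Int),
    (∀ k, d.get? k = if k ∈ p then some (pvIdx (p ++ l) k) else none) →
    ∀ a, a ∈ pvContrib l (p.length : Int) d ↔
      ∃ v, v ∈ l ∧ (v ∈ p ∨ 2 ≤ l.count v) ∧ a = pvIdx (p ++ l) v := by
  induction l with
  | nil => intro p d _ a; simp [pvContrib]
  | cons x t ih =>
    intro p d hd a
    have hfull : (p ++ [x]) ++ t = p ++ x :: t := by simp
    have hlen : ((p ++ [x]).length : Int) = (p.length : Int) + 1 := by simp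
    by_cases hx : x ∈ p
    · -- x already seen in the prefix
      have hc : d.contains x = true := by
        rw [PySem.Dict.contains_eq_isSome_get?, hd x, if_pos hx]; rfl
      have hdval : d.getD x 0 = pvIdx (p ++ x :: t) x := by
        rw [PySem.Dict.getD_eq_get?_getD, hd x, if_pos hx]; rfl
      have hd' : ∀ k, d.get? k = if k ∈ p ++ [x] then some (pvIdx ((p ++ [x]) ++ t) k) else none := by
        intro k
        rw [hd k, hfull]
        by_cases hk : k ∈ p
        · rw [if_pos hk, if_pos (List.mem_append_left _ hk)]
        · rw [if_neg hk, if_neg]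
          intro hmem
          rcases List.mem_append.mp hmem with h1 | h1
          · exact hk h1
          · exact hk (by rwa [List.mem_singleton.mp h1])
      have ihx := ih (p ++ [x]) d hd' a
      rw [hfull, hlen] at ihx
      simp only [pvContrib, hc, if_true, List.mem_cons, hdval]
      rw [ihx]
      constructor
      · rintro (rfl | ⟨v, hv, hcond, rfl⟩)
        · exact ⟨x, Or.inl rfl, Or.inl hx, rfl⟩
        · refine ⟨v, Or.inr hv, ?_, rfl⟩
          rcases hcond with h1 | h1
          · rcases List.mem_append.mp h1 with h2 | h2
            · exact Or.inl h2
            · exact Or.inl (by rwa [List.mem_singleton.mp h2])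
          · right
            have : t.count v ≤ (x :: t).count v := by
              simp [List.count_cons]
            omega
      · rintro ⟨v, hv, hcond, rfl⟩
        rcases hv with rfl | hv
        · exact Or.inl rfl
        · by_cases hvx : v = x
          · subst hvx; exact Or.inl rfl
          · refine Or.inr ⟨v, hv, ?_, rfl⟩
            rcases hcond with h1 | h1
            · exact Or.inl (List.mem_append_left _ h1)
            · right
              simp only [List.count_cons, beq_iff_eq, Ne.symm hvx, if_false] at h1
              exact h1
    · -- x is new: inserted with index p.length
      have hc : d.contains x = false := by
        rw [PySem.Dict.contains_eq_isSome_get?, hd x, if_neg hx]; rfl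
      have hidx : pvIdx (p ++ x :: t) x = (p.length : Int) := by
        rw [pvIdx, ← hfull,
          PySem.List.index?_append_of_mem t (List.mem_append_right p (List.mem_singleton.mpr rfl)),
          PySem.List.index?_append_singleton_self p x hx]
        simp
      have hd' : ∀ k, (d.insert x (p.length : Int)).get? k
          = if k ∈ p ++ [x] then some (pvIdx ((p ++ [x]) ++ t) k) else none := by
        intro k
        rw [PySem.Dict.get?_insert, hfull]
        by_cases hkx : k = x
        · subst hkx
          rw [if_pos rfl, if_pos (List.mem_append_right p (List.mem_singleton.mpr rfl)), hidx]
        · rw [if_neg hkx, hd k]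
          by_cases hk : k ∈ p
          · rw [if_pos hk, if_pos (List.mem_append_left _ hk)]
          · rw [if_neg hk, if_neg]
            intro hmem
            rcases List.mem_append.mp hmem with h1 | h1
            · exact hk h1
            · exact hkx (List.mem_singleton.mp h1)
      have ihx := ih (p ++ [x]) (d.insert x (p.length : Int)) hd' a
      rw [hfull, hlen] at ihx
      simp only [pvContrib, hc, Bool.false_eq_true, if_false, List.mem_cons]
      rw [ihx]
      constructor
      · rintro ⟨v, hv, hcond, rfl⟩
        by_cases hvx : v = x
        · subst hvx
          refine ⟨v, Or.inl rfl, Or.inr ?_, rfl⟩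
          rw [List.count_cons_self]
          have : 1 ≤ t.count v := List.count_pos_iff.mpr hv
          omega
        · refine ⟨v, Or.inr hv, ?_, rfl⟩
          rcases hcond with h1 | h1
          · rcases List.mem_append.mp h1 with h2 | h2
            · exact Or.inl h2
            · exact absurd (List.mem_singleton.mp h2) hvx
          · right
            simp only [List.count_cons, beq_iff_eq, Ne.symm hvx, if_false]
            omega
      · rintro ⟨v, hv, hcond, rfl⟩
        by_cases hvx : v = x
        · subst hvx
          rcases hcond with h1 | h1
          · exact absurd h1 hx
          · rw [List.count_cons_self] at h1
            have hvt : v ∈ t := List.count_pos_iff.mp (by omega)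
            exact ⟨v, hvt, Or.inl (List.mem_append_right p (List.mem_singleton.mpr rfl)), rfl⟩
        · rcases hv with rfl | hv
          · exact absurd rfl hvx
          · refine ⟨v, hv, ?_, rfl⟩
            rcases hcond with h1 | h1
            · exact Or.inl (List.mem_append_left _ h1)
            · right
              simp only [List.count_cons, beq_iff_eq, Ne.symm hvx, if_false] at h1
              exact h1

theorem pv_A_eq (inv : List Int) :
    ((inv.foldl (fun d num => d.insert num (d.getD num 0 + 1)) (PySem.Dict.empty : PySem.Dict Int Int)).items).foldl
      (fun primRep p =>
        if p.2 > 1 then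
          match PySem.List.index? inv p.1 with
          | some ind =>
            (match primRep with
             | none => some (ind : Int)
             | some q => if q < (ind : Int) then some (ind : Int) else some q)
          | none => primRep
        else primRep) none
      = pvCanon inv := by
  show ((PySem.Dict.counter inv).items).foldl
      (fun primRep p =>
        if p.2 > 1 then
          match PySem.List.index? inv p.1 with
          | some ind =>
            (match primRep with
             | none => some (ind : Int)
             | some q => if q < (ind : Int) then some (ind : Int) else some q)
          | none => primRep
        else primRep) none
      = pvCanon inv
  rw [PySem.Dict.items_counter, List.foldl_map]
  rw [pvCanon, List.foldl_filter]
  apply PySem.List.foldl_congr_mem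
  intro a k hk
  have hkmem : k ∈ inv := (PySem.Set.mem_ofList inv k).mp hk
  obtain ⟨i, hi⟩ := Option.isSome_iff_exists.mp ((PySem.List.index?_isSome_iff inv k).mpr hkmem)
  simp only [hi, pvStep, pvIdx, gt_iff_lt, decide_eq_true_eq]
  by_cases h1 : (1 : Int) < (List.count k inv : Int)
  · simp [h1]
  · simp [h1]

theorem pv_B_eq (inv : List Int) :
    ((PySem.List.enumerate inv 0).foldl
      (fun (st : PySem.Dict Int Int × Option Int) p =>
        if st.1.contains p.2 then
          (st.1,
           match st.2 with
           | none => some (st.1.getD p.2 0)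
           | some q => if q < st.1.getD p.2 0 then some (st.1.getD p.2 0) else some q)
        else (st.1.insert p.2 p.1, st.2))
      ((PySem.Dict.empty : PySem.Dict Int Int), (none : Option Int))).2
      = pvCanon inv := by
  rw [pv_loopB]
  rw [pv_foldl_pvStep_eq_max?]
  rw [pvCanon]
  rw [show (fun (a : Option Int) (k : Int) => pvStep a (pvIdx inv k))
        = (fun a k => pvStep a ((pvIdx inv) k)) from rfl]
  rw [← List.foldl_map (f := pvIdx inv) (g := pvStep), pv_foldl_pvStep_eq_max?]
  apply pv_max?_ext
  intro a
  have h0 : ∀ k : Int, (PySem.Dict.empty : PySem.Dict Int Int).get? k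
      = if k ∈ ([] : List Int) then some (pvIdx (([] : List Int) ++ inv) k) else none := by
    intro k; simp [PySem.Dict.get?_empty]
  rw [show (0 : Int) = (([] : List Int).length : Int) from rfl]
  rw [pv_contrib_mem inv [] _ h0 a]
  simp only [List.nil_append, List.mem_map, List.mem_filter, List.not_mem_nil, false_or]
  constructor
  · rintro ⟨v, hv, hc, rfl⟩
    exact ⟨v, ⟨(PySem.Set.mem_ofList inv v).mpr hv, by simp; omega⟩, rfl⟩
  · rintro ⟨v, ⟨hv, hc⟩, rfl⟩
    have := (PySem.Set.mem_ofList inv v).mp hv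
    simp at hc
    exact ⟨v, this, by omega, rfl⟩

-- ===== VERDICT (by name: the statement is the Claim_ definition above) =====
theorem primerDuplic_spec : Claim_equal_primerDuplic := by
  intro numList _
  unfold Spec_primerDuplic primerDuplic primerDuplic_alt
  exact (pv_A_eq numList.reverse).trans (pv_B_eq numList.reverse).symm
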